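-- pv_equiv track=rewrite | github.com/sepep-pmsp/observatorio-ods | src/app/service/dados.py | organize_indicators
-- ===== SOURCE A (Python) =====
-- from collections import defaultdict
--
-- def organize_indicators(data):
--     organized_data = defaultdict(list)
--
--     for item in data:
--         indicador_group = item['nm_indicador'].split('.')[0]  # Obtém o primeiro grupo, ex: "01"
--         organized_data[indicador_group].append(item)
--
--     # Ordena os indicadores dentro de cada grupo de forma crescente
--     for key in organized_data:
--         organized_data[key] = sorted(organized_data[key], key=lambda x: x['nm_indicador'])
--
--     # Ordena as chaves dos grupos de forma crescente
--     sorted_organized_data = dict(sorted(organized_data.items()))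
--
--     return sorted_organized_data
-- ===== SOURCE B (Python) =====
-- def organize_indicators(data):
--     # Sorted distinct prefixes, then one dict comprehension: for each prefix,
--     # filter its items out of the original list and sort them by indicator.
--     keys = sorted({item['nm_indicador'].split('.')[0] for item in data})
--     return {k: sorted((it for it in data if it['nm_indicador'].split('.')[0] == k),
--                       key=lambda x: x['nm_indicador'])
--             for k in keys}
-- ===== Notes on version B (the rewrite author's own statement) =====
-- stated objective: simpler
-- what changed: B drops A's incremental defaultdict grouping and in-place per-key re-sorting: it computes the sorted set of prefixes once, then builds the result by a dict comprehension that filters and sorts each group's items directly from the input.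
import Mathlib
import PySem

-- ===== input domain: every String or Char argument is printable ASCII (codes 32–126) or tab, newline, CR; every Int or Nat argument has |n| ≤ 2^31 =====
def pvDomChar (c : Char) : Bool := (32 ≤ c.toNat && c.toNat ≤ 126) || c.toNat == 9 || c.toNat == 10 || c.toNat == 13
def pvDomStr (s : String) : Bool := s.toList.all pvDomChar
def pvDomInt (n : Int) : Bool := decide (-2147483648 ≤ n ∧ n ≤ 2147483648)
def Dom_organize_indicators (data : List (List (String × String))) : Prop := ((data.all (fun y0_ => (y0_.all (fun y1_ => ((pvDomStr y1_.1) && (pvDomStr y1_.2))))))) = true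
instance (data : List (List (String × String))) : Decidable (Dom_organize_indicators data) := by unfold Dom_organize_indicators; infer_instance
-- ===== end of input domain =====

-- B replaces A's incremental defaultdict grouping + per-key re-sorting by a sorted set of prefixes and a per-key filter-and-sort comprehension (objective: simpler).


-- ===== PORT A =====
-- item['nm_indicador']: first-match lookup on the association list (Pre_ guarantees the key is present;
-- the "" default is never reached inside Pre_).
def pvInd (item : List (String × String)) : String :=
  (PySem.Dict.mk item).getD "nm_indicador" ""

-- item['nm_indicador'].split('.')[0]: split by "." is always `some` of a nonempty list, so [0] never raises.
def pvGroup (item : List (String × String)) : String :=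
  (((PySem.Str.split? (pvInd item) ".").getD []).headD "")

def organize_indicators (data : List (List (String × String))) : List (String × List (List (String × String))) :=
  -- organized_data = defaultdict(list); for item in data: organized_data[group].append(item)
  let organized := data.foldl (fun d item => d.modify (pvGroup item) [] (fun l => l ++ [item])) PySem.Dict.empty
  -- for key in organized_data: organized_data[key] = sorted(organized_data[key], key=lambda x: x['nm_indicador'])
  let organized2 := organized.keys.foldl (fun d k => d.insert k (PySem.List.sorted (d.getD k []) pvInd)) organized
  -- dict(sorted(organized_data.items())): dict keys are distinct, so Python's tuple sort compares keys only;
  -- the resulting dict, as an association list, is exactly the sorted items list.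
  PySem.List.sorted organized2.items (fun p => p.1)

-- ===== PORT B =====
def organize_indicators_alt (data : List (List (String × String))) : List (String × List (List (String × String))) :=
  -- keys = sorted({item['nm_indicador'].split('.')[0] for item in data}); sorted without key on a set is order-safe
  let keys := PySem.List.sorted (PySem.Set.ofList (data.map pvGroup)) (fun k => k)
  -- {k: sorted((it for it in data if group(it) == k), key=...) for k in keys}: distinct keys, insertion order = keys order
  keys.map (fun k => (k, PySem.List.sorted (data.filter (fun it => pvGroup it == k)) pvInd))

-- ===== PRECONDITION & SPEC =====
-- Pre_ excludes exactly the inputs where some item lacks the key 'nm_indicador', on which A raises KeyError.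
def Pre_organize_indicators (data : List (List (String × String))) : Prop :=
  ∀ item ∈ data, "nm_indicador" ∈ item.map Prod.fst
instance (data : List (List (String × String))) : Decidable (Pre_organize_indicators data) := by unfold Pre_organize_indicators; infer_instance

def pvWitness_organize_indicators : (List (List (String × String))) :=
  [[("nm_indicador", "1.2"), ("v", "x")], [("nm_indicador", "1.1")]]

def Spec_organize_indicators (data : List (List (String × String))) (out : List (String × List (List (String × String)))) : Prop := out = organize_indicators_alt data
instance (data : List (List (String × String))) (out : List (String × List (List (String × String)))) : Decidable (Spec_organize_indicators data out) := by unfold Spec_organize_indicators; infer_instance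

-- ===== CLAIM (what is proved, stated in full; the proofs are below) =====
def Claim_equal_organize_indicators : Prop := ∀ (data : List (List (String × String))), Dom_organize_indicators data → Pre_organize_indicators data → Spec_organize_indicators data (organize_indicators data)

-- ===== LEMMAS AND PROOFS =====

-- the grouping fold: default-value lookups give exactly the filtered sublist.
theorem group_getD (l : List (List (String × String))) (k : String) :
    ((l.foldl (fun d item => d.modify (pvGroup item) [] (fun v => v ++ [item])) PySem.Dict.empty).getD k [])
      = l.filter (fun it => pvGroup it == k) := by
  have h := PySem.Dict.getD_foldl_modify_append (l.map (fun it => (pvGroup it, it)))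
      (PySem.Dict.empty) k
  rw [List.foldl_map] at h
  simp only [h, PySem.Dict.getD_empty, List.nil_append, List.filter_map, List.map_map]
  have : ((fun x : String × List (String × String) => x.2) ∘ fun it => (pvGroup it, it)) = id := rfl
  rw [this, List.map_id]
  rfl

-- the grouping fold: keys, in first-occurrence order.
theorem group_keys (l : List (List (String × String))) :
    (l.foldl (fun d item => d.modify (pvGroup item) [] (fun v => v ++ [item])) PySem.Dict.empty).keys
      = PySem.Set.ofList (l.map pvGroup) := by
  rw [PySem.Dict.keys_foldl_modify_key l pvGroup [] (fun _ item => (fun v => v ++ [item]))]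
  rfl

theorem group_nodup (l : List (List (String × String))) :
    (l.foldl (fun d item => d.modify (pvGroup item) [] (fun v => v ++ [item])) PySem.Dict.empty).keys.Nodup := by
  exact PySem.Dict.nodup_keys_foldl_modify_key l pvGroup [] (fun _ item => (fun v => v ++ [item]))
    PySem.Dict.empty (by simp [PySem.Dict.keys_empty])

-- A's second loop: lookups after the value-sorting pass.
theorem sortvals_getD (ks : List String) (d : PySem.Dict String (List (List (String × String))))
    (hks : ks.Nodup) (j : String) :
    ((ks.foldl (fun d k => d.insert k (PySem.List.sorted (d.getD k []) pvInd)) d).getD j [])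
      = if j ∈ ks then PySem.List.sorted (d.getD j []) pvInd else d.getD j [] := by
  induction ks generalizing d with
  | nil => simp
  | cons k ks ih =>
    rw [List.nodup_cons] at hks
    rw [List.foldl_cons, ih _ hks.2]
    by_cases hjk : j = k
    · subst hjk
      rw [if_neg hks.1, PySem.Dict.getD_insert, if_pos rfl, if_pos (List.mem_cons_self)]
    · rw [PySem.Dict.getD_insert, if_neg hjk]
      by_cases hj : j ∈ ks
      · rw [if_pos hj, if_pos (List.mem_cons_of_mem _ hj)]
      · rw [if_neg hj, if_neg (by simp [hjk, hj])]

theorem set_update_self {α : Type} [BEq α] [LawfulBEq α] (s : PySem.Set α) (l : List α)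
    (h : ∀ x ∈ l, x ∈ s) : PySem.Set.update s l = s := by
  induction l with
  | nil => rfl
  | cons x l ih =>
    have hx : PySem.Set.add s x = s := by
      simp [PySem.Set.add, h x (List.mem_cons_self)]
    show PySem.Set.update (PySem.Set.add s x) l = s
    rw [hx, ih (fun y hy => h y (List.mem_cons_of_mem _ hy))]

-- ===== VERDICT (by name: the statement is the Claim_ definition above) =====
theorem organize_indicators_spec : Claim_equal_organize_indicators := by
  intro data _ _
  show organize_indicators data = organize_indicators_alt data
  unfold organize_indicators organize_indicators_alt
  set gk := pvGroup with hgk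
  set dA := data.foldl (fun d item => d.modify (gk item) [] (fun l => l ++ [item])) PySem.Dict.empty with hdA
  set d2 := dA.keys.foldl (fun d k => d.insert k (PySem.List.sorted (d.getD k []) pvInd)) dA with hd2
  set K := PySem.Set.ofList (data.map gk) with hK
  set F := fun k => (k, PySem.List.sorted (data.filter (fun it => gk it == k)) pvInd) with hF
  have hKA : dA.keys = K := group_keys data
  have hNA : dA.keys.Nodup := group_nodup data
  -- A's dict items after the value-sorting loop
  have hkeys2 : d2.keys = dA.keys := by
    rw [hd2, PySem.Dict.keys_foldl_insert, set_update_self _ _ (fun x hx => hx)]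
  have hN2 : d2.keys.Nodup := by rw [hkeys2]; exact hNA
  have hitemsA : d2.items = K.map F := by
    rw [PySem.Dict.items_eq_map_keys d2 hN2 [], hkeys2, hKA]
    refine List.map_congr_left (fun k hk => ?_)
    rw [hd2, sortvals_getD dA.keys dA hNA k, if_pos (by rw [hKA]; exact hk),
        group_getD data k, hF]
  -- B is literally the sorted keys mapped through F; A's final sort yields the same list
  have hpair : ((PySem.List.sorted K (fun k => k)).map F).Pairwise
      (fun a b => (fun p => p.1) a < (fun p => p.1) b) := by
    refine List.Pairwise.map F (fun a b hab => ?_) (PySem.List.sorted_ofList_pairwise_lt (data.map gk))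
    simpa [hF] using hab
  have hA : PySem.List.sorted d2.items (fun p => p.1) = (PySem.List.sorted K (fun k => k)).map F := by
    refine PySem.List.sorted_eq_of_perm_of_pairwise_lt _ _ _ ?_ hpair
    rw [hitemsA]
    exact (PySem.List.sorted_perm K (fun k => k) false).map F
  exact hA
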